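-- pv_equiv track=rewrite | github.com/wilmurillo-ai/Design-Assistant | .skills/openclaw-skills/skills/70asunflower/notion-im-helper/scripts/record.py | parse_metadata
-- ===== SOURCE A (Python) =====
-- def parse_metadata(text):
--     """Extract tags (#xxx) and project (/p:xxx) from end of text."""
--     tags = []
--     project = None
--
--     # Scan from the end of text, line by line
--     lines = text.strip().split("\n")
--     meta_line_indices = []
--     remaining_lines = []
--
--     for i, line in enumerate(lines):
--         tokens = line.split()
--         is_meta_line = False
--         for tok in tokens:
--             if tok.startswith("#") or tok.startswith("/p:"):
--                 is_meta_line = True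
--                 break
--         if is_meta_line:
--             meta_line_indices.append(i)
--         else:
--             remaining_lines.append(line)
--
--     # Extract tags and project from meta lines
--     meta_text = " ".join(lines[i] for i in meta_line_indices)
--     for tok in meta_text.split():
--         if tok.startswith("#"):
--             tags.append(tok[1:])
--         elif tok.startswith("/p:"):
--             project = tok[3:]
--
--     clean_text = "\n".join(remaining_lines).strip()
--     return clean_text, tags, project
-- ===== SOURCE B (Python) =====
-- def parse_metadata(text):
--     tags = []
--     project = None
--     remaining_lines = []
--     for line in text.strip().split("\n"):
--         tokens = line.split()
--         if any(t.startswith("#") or t.startswith("/p:") for t in tokens):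
--             for tok in tokens:
--                 if tok.startswith("#"):
--                     tags.append(tok[1:])
--                 elif tok.startswith("/p:"):
--                     project = tok[3:]
--         else:
--             remaining_lines.append(line)
--     return "\n".join(remaining_lines).strip(), tags, project
-- ===== Notes on version B (the rewrite author's own statement) =====
-- stated objective: simpler
-- what changed: Replaced A's two-phase scheme (collect meta line indices, join those lines with spaces, re-split the joined text, then extract) with a single pass over the lines that extracts tags and the project directly from each meta line's tokens, dropping the index list, the join and the second split.
import Mathlib
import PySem

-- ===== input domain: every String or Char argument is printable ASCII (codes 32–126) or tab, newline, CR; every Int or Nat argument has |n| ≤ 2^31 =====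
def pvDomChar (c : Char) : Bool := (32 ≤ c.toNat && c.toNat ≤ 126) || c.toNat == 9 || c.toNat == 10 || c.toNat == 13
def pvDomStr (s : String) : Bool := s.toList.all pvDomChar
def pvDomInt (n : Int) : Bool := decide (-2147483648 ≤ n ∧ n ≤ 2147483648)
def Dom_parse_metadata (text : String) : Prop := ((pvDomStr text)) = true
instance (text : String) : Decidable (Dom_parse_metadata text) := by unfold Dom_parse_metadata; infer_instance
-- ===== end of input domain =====

-- B fuses A's two phases (classify meta lines + re-split the joined meta text) into one pass
-- over the lines that extracts tags/project directly from each meta line's tokens: simpler, same values.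

-- Shared token-level helpers (identical token tests/updates appear verbatim in both Pythons).
def pvMetaTok (tok : List Char) : Bool :=
  PySem.Chars.startswith tok ['#'] || PySem.Chars.startswith tok ['/', 'p', ':']

def pvTokStep (tp : List (List Char) × Option (List Char)) (tok : List Char) :
    List (List Char) × Option (List Char) :=
  if PySem.Chars.startswith tok ['#'] then (tp.1 ++ [PySem.List.slice tok (some 1) none], tp.2)
  else if PySem.Chars.startswith tok ['/', 'p', ':'] then
    (tp.1, some (PySem.List.slice tok (some 3) none))
  else tp

-- ===== PORT A =====
def parse_metadata (text : String) : String × List String × Option String :=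
  let lines := PySem.Chars.splitOn (PySem.Chars.strip text.toList) ['\n']
  -- phase 1: collect meta line indices and remaining lines (token loop with break = any)
  let st := lines.zipIdx.foldl
    (fun (st : List Nat × List (List Char)) p =>
      if (PySem.Chars.split₀ p.1).any pvMetaTok then (st.1 ++ [p.2], st.2)
      else (st.1, st.2 ++ [p.1]))
    ([], [])
  -- phase 2: join the indexed meta lines with " ", split again, extract tags/project
  let meta_text := PySem.Chars.join [' '] (st.1.map (fun i => lines.getD i []))
  let tp := (PySem.Chars.split₀ meta_text).foldl pvTokStep ([], none)
  let clean := PySem.Chars.strip (PySem.Chars.join ['\n'] st.2)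
  (String.mk clean, tp.1.map String.mk, tp.2.map String.mk)

-- ===== PORT B =====
def parse_metadata_alt (text : String) : String × List String × Option String :=
  let st := (PySem.Chars.splitOn (PySem.Chars.strip text.toList) ['\n']).foldl
    (fun (st : List (List Char) × List (List Char) × Option (List Char)) line =>
      let toks := PySem.Chars.split₀ line
      if toks.any pvMetaTok then (st.1, toks.foldl pvTokStep st.2)
      else (st.1 ++ [line], st.2))
    ([], [], none)
  (String.mk (PySem.Chars.strip (PySem.Chars.join ['\n'] st.1)),
   st.2.1.map String.mk, st.2.2.map String.mk)

-- ===== PRECONDITION & SPEC =====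
def Spec_parse_metadata (text : String) (out : String × List String × Option String) : Prop := out = parse_metadata_alt text
instance (text : String) (out : String × List String × Option String) : Decidable (Spec_parse_metadata text out) := by unfold Spec_parse_metadata; infer_instance

-- ===== CLAIM (what is proved, stated in full; the proofs are below) =====
def Claim_equal_parse_metadata : Prop := ∀ (text : String), Dom_parse_metadata text → Spec_parse_metadata text (parse_metadata text)

-- ===== LEMMAS AND PROOFS =====

-- split₀'s worker with a nonempty accumulator just prepends the reversed accumulator.
lemma pv_split0_go_acc (s : List Char) :
    ∀ (cur : List Char) (acc : List (List Char)),
    PySem.Chars.split₀.go s cur acc = acc.reverse ++ PySem.Chars.split₀.go s cur [] := by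
  induction s with
  | nil =>
    intro cur acc
    simp only [PySem.Chars.split₀.go]
    split_ifs <;> simp
  | cons c rest ih =>
    intro cur acc
    simp only [PySem.Chars.split₀.go]
    split_ifs with h1 h2
    · exact ih [] acc
    · rw [ih [] (cur.reverse :: acc), ih [] [cur.reverse]]
      simp
    · exact ih (c :: cur) acc

-- A single space splits the whitespace-split cleanly in two.
lemma pv_split0_space (a : List Char) :
    ∀ (b cur : List Char),
    PySem.Chars.split₀.go (a ++ ' ' :: b) cur [] =
      PySem.Chars.split₀.go a cur [] ++ PySem.Chars.split₀.go b [] [] := by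
  induction a with
  | nil =>
    intro b cur
    simp only [List.nil_append, PySem.Chars.split₀.go]
    have hsp : PySem.Chars.isspace ' ' = true := by decide
    rw [if_pos hsp]
    split_ifs with h
    · simp
    · rw [pv_split0_go_acc b [] [cur.reverse]]
  | cons c rest ih =>
    intro b cur
    simp only [List.cons_append, PySem.Chars.split₀.go]
    split_ifs with h1 h2
    · exact ih b []
    · rw [pv_split0_go_acc (rest ++ ' ' :: b) [] [cur.reverse],
          pv_split0_go_acc rest [] [cur.reverse], ih b []]
      simp
    · exact ih b (c :: cur)

lemma pv_split0_append_space (a b : List Char) :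
    PySem.Chars.split₀ (a ++ ' ' :: b) = PySem.Chars.split₀ a ++ PySem.Chars.split₀ b := by
  simp [PySem.Chars.split₀, pv_split0_space]

-- Joining lines with " " and re-splitting gives the per-line token lists, concatenated.
lemma pv_split0_join (ls : List (List Char)) :
    PySem.Chars.split₀ (PySem.Chars.join [' '] ls) = ls.flatMap PySem.Chars.split₀ := by
  induction ls with
  | nil => rfl
  | cons x xs ih =>
    cases xs with
    | nil => simp [PySem.Chars.join_singleton]
    | cons y ys =>
      rw [PySem.Chars.join_cons_cons]
      have : x ++ [' '] ++ PySem.Chars.join [' '] (y :: ys)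
           = x ++ ' ' :: PySem.Chars.join [' '] (y :: ys) := by simp
      rw [this, pv_split0_append_space, ih]
      simp [List.flatMap_cons]

-- Folding the token step over a concatenation of token lists = folding line by line.
lemma pv_foldl_flatMap (ls : List (List Char)) :
    ∀ (tp : List (List Char) × Option (List Char)),
    (ls.flatMap PySem.Chars.split₀).foldl pvTokStep tp =
      ls.foldl (fun tp l => (PySem.Chars.split₀ l).foldl pvTokStep tp) tp := by
  induction ls with
  | nil => intro tp; rfl
  | cons x xs ih => intro tp; simp [List.flatMap_cons, List.foldl_append, ih]

-- Phase 1 of A: the collected indices point exactly at the meta lines (in order),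
-- and the remaining lines are exactly the non-meta lines.
lemma pv_phase1 (lines : List (List Char)) (ls : List (List Char)) :
    ∀ (n : Nat) (idx : List Nat) (rs : List (List Char)),
    lines.drop n = ls →
    ((ls.zipIdx n).foldl
      (fun (st : List Nat × List (List Char)) p =>
        if (PySem.Chars.split₀ p.1).any pvMetaTok then (st.1 ++ [p.2], st.2)
        else (st.1, st.2 ++ [p.1])) (idx, rs)).1.map (fun i => lines.getD i []) =
        idx.map (fun i => lines.getD i []) ++
          ls.filter (fun l => (PySem.Chars.split₀ l).any pvMetaTok)
    ∧ ((ls.zipIdx n).foldl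
      (fun (st : List Nat × List (List Char)) p =>
        if (PySem.Chars.split₀ p.1).any pvMetaTok then (st.1 ++ [p.2], st.2)
        else (st.1, st.2 ++ [p.1])) (idx, rs)).2 =
        rs ++ ls.filter (fun l => !(PySem.Chars.split₀ l).any pvMetaTok) := by
  induction ls with
  | nil => intro n idx rs _; simp
  | cons l ls' ih =>
    intro n idx rs h
    have hn : lines[n]?.getD [] = l := by
      have h0 : (lines.drop n)[0]? = some l := by rw [h]; rfl
      rw [List.getElem?_drop] at h0
      simp only [Nat.add_zero] at h0
      rw [h0]; rfl
    have hdrop : lines.drop (n + 1) = ls' := by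
      have : lines.drop (n + 1) = (lines.drop n).drop 1 := by
        rw [List.drop_drop]
      rw [this, h]; rfl
    rw [List.zipIdx_cons]
    by_cases hm : (PySem.Chars.split₀ l).any pvMetaTok = true
    · have := ih (n + 1) (idx ++ [n]) rs hdrop
      simp only [List.foldl_cons, hm, if_pos]
      refine ⟨?_, ?_⟩
      · rw [this.1]; simp [hm, hn]
      · rw [this.2]; simp [hm]
    · have := ih (n + 1) idx (rs ++ [l]) hdrop
      simp only [List.foldl_cons, hm, if_neg, Bool.not_eq_true]
      refine ⟨?_, ?_⟩
      · rw [this.1]; simp [hm]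
      · rw [this.2]; simp [hm]

-- B's fused pass, characterised: non-meta lines accumulate, meta lines feed the token fold.
lemma pv_phaseB (ls : List (List Char)) :
    ∀ (rem : List (List Char)) (tp : List (List Char) × Option (List Char)),
    (ls.foldl
      (fun (st : List (List Char) × List (List Char) × Option (List Char)) line =>
        let toks := PySem.Chars.split₀ line
        if toks.any pvMetaTok then (st.1, toks.foldl pvTokStep st.2)
        else (st.1 ++ [line], st.2)) (rem, tp)) =
      (rem ++ ls.filter (fun l => !(PySem.Chars.split₀ l).any pvMetaTok),
       (ls.filter (fun l => (PySem.Chars.split₀ l).any pvMetaTok)).foldl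
         (fun tp l => (PySem.Chars.split₀ l).foldl pvTokStep tp) tp) := by
  induction ls with
  | nil => intro rem tp; simp
  | cons l ls' ih =>
    intro rem tp
    by_cases hm : (PySem.Chars.split₀ l).any pvMetaTok = true
    · simp only [List.foldl_cons, hm, if_pos]
      rw [ih]; simp [hm]
    · simp only [List.foldl_cons, hm, if_neg, Bool.not_eq_true]
      rw [ih]; simp [hm]

-- ===== VERDICT (by name: the statement is the Claim_ definition above) =====
theorem parse_metadata_spec : Claim_equal_parse_metadata := by
  intro text _
  unfold Spec_parse_metadata parse_metadata parse_metadata_alt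
  simp only []
  set lines := PySem.Chars.splitOn (PySem.Chars.strip text.toList) ['\n'] with hlines
  have h1 := pv_phase1 lines lines 0 [] [] (by simp)
  rw [pv_phaseB]
  simp only [List.map_nil, List.nil_append] at h1
  rw [h1.1, h1.2, pv_split0_join, pv_foldl_flatMap]
  simp
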